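-- pv_equiv track=rewrite | github.com/cawilchesp/object_trackers | examples/create_gzip.py | assing_key
-- ===== SOURCE A (Python) =====
-- def assing_key(dict_out, key_mov, value):
--     dict_len=dict() # sufijo: [prefijos]
--     # revisa cual es el prefijo en dict_out
--     for val in dict_out.keys():
--         key_len, count = map(int, val.split('_'))
--         if key_len in dict_len:
--             dict_len[key_len].append(count)
--         else:
--             dict_len[key_len]=[count]
--
--     # Agrega nueva key con prefijo incremental
--     if key_mov in dict_len:
--         dict_out[f'{key_mov}_{str(max(dict_len[key_mov]) + 1)}'] = value
--     else:
--         dict_out[f'{key_mov}_0'] = value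
--     return dict_out
-- ===== SOURCE B (Python) =====
-- def assing_key(dict_out, key_mov, value):
--     # single running-max pass over the keys; parses every key like the original
--     best = None
--     for val in dict_out.keys():
--         key_len, count = map(int, val.split('_'))
--         if key_len == key_mov:
--             best = count if best is None else max(best, count)
--     suffix = 0 if best is None else best + 1
--     dict_out[f'{key_mov}_{suffix}'] = value
--     return dict_out
-- ===== Notes on version B (the rewrite author's own statement) =====
-- stated objective: simpler
-- what changed: replaces the dict-of-lists grouping pass plus a max() scan with one running-max scalar maintained in a single loop over the keys
import Mathlib
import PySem

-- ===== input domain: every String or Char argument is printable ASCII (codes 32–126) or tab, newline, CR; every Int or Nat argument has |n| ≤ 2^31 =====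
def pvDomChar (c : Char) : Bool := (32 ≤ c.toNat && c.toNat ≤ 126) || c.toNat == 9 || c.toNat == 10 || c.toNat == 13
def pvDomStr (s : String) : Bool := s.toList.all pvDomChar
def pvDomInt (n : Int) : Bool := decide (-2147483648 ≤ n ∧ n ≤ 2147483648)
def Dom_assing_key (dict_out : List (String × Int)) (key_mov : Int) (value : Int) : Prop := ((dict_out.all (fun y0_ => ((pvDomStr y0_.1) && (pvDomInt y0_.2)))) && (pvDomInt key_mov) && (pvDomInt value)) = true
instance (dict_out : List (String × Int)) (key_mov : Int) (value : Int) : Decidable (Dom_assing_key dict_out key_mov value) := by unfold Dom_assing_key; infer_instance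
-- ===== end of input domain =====

-- B replaces A's dict-of-lists grouping pass plus a max() scan by a single running-max
-- scalar maintained in one loop over the keys (objective: simpler).

-- `key_len, count = map(int, val.split('_'))`: exactly two '_'-separated parts, both int(·)-parseable
def pvParseKey (val : String) : Option (Int × Int) :=
  match PySem.Str.split? val "_" with
  | some [a, b] =>
    match PySem.Int.ofStr? a, PySem.Int.ofStr? b with
    | some x, some y => some (x, y)
    | _, _ => none
  | _ => none

-- ===== PORT A =====
-- the grouping loop: dict_len maps suffix -> list of counts (none = some key raised)
def pvBuildLenA (keys : List String) : Option (PySem.Dict Int (List Int)) :=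
  keys.foldlM (fun dl val =>
    (pvParseKey val).map (fun kc =>
      match dl.get? kc.1 with
      | some l => dl.insert kc.1 (l ++ [kc.2])
      | none => dl.insert kc.1 [kc.2])) PySem.Dict.empty

def assing_key (dict_out : List (String × Int)) (key_mov : Int) (value : Int) : List (String × Int) :=
  match pvBuildLenA (PySem.Dict.ofList dict_out).keys with
  | none => (PySem.Dict.ofList dict_out).items   -- a key raised ValueError: outside Pre_
  | some dl =>
    match dl.get? key_mov with
    | some l =>
      match PySem.List.max? l (fun x => x) with
      | some m => ((PySem.Dict.ofList dict_out).insert (PySem.Int.toStr key_mov ++ "_" ++ PySem.Int.toStr (m + 1)) value).items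
      | none => (PySem.Dict.ofList dict_out).items   -- max([]) : unreachable (the grouped lists are never empty)
    | none => ((PySem.Dict.ofList dict_out).insert (PySem.Int.toStr key_mov ++ "_0") value).items

-- ===== PORT B =====
-- the running-max loop: best = largest count seen for key_mov, if any (none = some key raised)
def pvBestB (keys : List String) (key_mov : Int) : Option (Option Int) :=
  keys.foldlM (fun best val =>
    (pvParseKey val).map (fun kc =>
      if kc.1 == key_mov then
        some (match best with | none => kc.2 | some b => max b kc.2)
      else best)) none

def assing_key_alt (dict_out : List (String × Int)) (key_mov : Int) (value : Int) : List (String × Int) :=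
  match pvBestB (PySem.Dict.ofList dict_out).keys key_mov with
  | none => (PySem.Dict.ofList dict_out).items   -- a key raised ValueError: outside Pre_
  | some best =>
    ((PySem.Dict.ofList dict_out).insert
      (PySem.Int.toStr key_mov ++ "_" ++
        PySem.Int.toStr (match best with | none => 0 | some b => b + 1)) value).items

-- ===== PRECONDITION & SPEC =====
-- Pre_ excludes exactly the inputs on which A raises: a key that does not split into
-- exactly two int(·)-parseable parts makes `key_len, count = map(int, val.split('_'))` raise.
def Pre_assing_key (dict_out : List (String × Int)) (key_mov : Int) (value : Int) : Prop :=
  ∀ p ∈ dict_out, (pvParseKey p.1).isSome = true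
instance (dict_out : List (String × Int)) (key_mov : Int) (value : Int) : Decidable (Pre_assing_key dict_out key_mov value) := by unfold Pre_assing_key; infer_instance
def pvWitness_assing_key : (List (String × Int)) × Int × Int := ([("1_0", 5), ("2_0", 7), ("1_3", 9)], 1, 4)
def Spec_assing_key (dict_out : List (String × Int)) (key_mov : Int) (value : Int) (out : List (String × Int)) : Prop := out = assing_key_alt dict_out key_mov value
instance (dict_out : List (String × Int)) (key_mov : Int) (value : Int) (out : List (String × Int)) : Decidable (Spec_assing_key dict_out key_mov value out) := by unfold Spec_assing_key; infer_instance

-- ===== CLAIM (what is proved, stated in full; the proofs are below) =====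
def Claim_equal_assing_key : Prop := ∀ (dict_out : List (String × Int)) (key_mov : Int) (value : Int), Dom_assing_key dict_out key_mov value → Pre_assing_key dict_out key_mov value → Spec_assing_key dict_out key_mov value (assing_key dict_out key_mov value)

-- ===== LEMMAS AND PROOFS =====

-- relation between A's group-for-key_mov and B's running max
def pvGood (key_mov : Int) (dl : PySem.Dict Int (List Int)) (best : Option Int) : Prop :=
  match dl.get? key_mov with
  | none => best = none
  | some l => l ≠ [] ∧ PySem.List.max? l (fun x => x) = best

theorem pvLoop (key_mov : Int) (keys : List String)
    (hp : ∀ k ∈ keys, (pvParseKey k).isSome = true) :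
    ∀ (dl : PySem.Dict Int (List Int)) (best : Option Int), pvGood key_mov dl best →
    ∃ dl' best',
      keys.foldlM (fun dl val =>
        (pvParseKey val).map (fun kc =>
          match dl.get? kc.1 with
          | some l => dl.insert kc.1 (l ++ [kc.2])
          | none => dl.insert kc.1 [kc.2])) dl = some dl' ∧
      keys.foldlM (fun best val =>
        (pvParseKey val).map (fun kc =>
          if kc.1 == key_mov then
            some (match best with | none => kc.2 | some b => max b kc.2)
          else best)) best = some best' ∧
      pvGood key_mov dl' best' := by
  induction keys with
  | nil => intro dl best h; exact ⟨dl, best, rfl, rfl, h⟩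
  | cons k ks ih =>
    intro dl best h
    obtain ⟨kl, c, hkc⟩ : ∃ kl c, pvParseKey k = some (kl, c) := by
      have := hp k (List.mem_cons_self ..)
      rcases hv : pvParseKey k with _ | ⟨kl, c⟩
      · rw [hv] at this; simp at this
      · exact ⟨kl, c, rfl⟩
    have hp' : ∀ x ∈ ks, (pvParseKey x).isSome = true := fun x hx => hp x (List.mem_cons_of_mem _ hx)
    -- one step of each loop
    simp only [List.foldlM_cons, hkc, Option.map_some, Option.bind_some]
    apply ih hp'
    -- preservation of pvGood through one step
    by_cases hk : kl = key_mov
    · subst hk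
      unfold pvGood at h ⊢
      rcases hl : dl.get? kl with _ | l
      · rw [hl] at h
        simp only [hl, h, beq_self_eq_true, if_pos]
        rw [PySem.Dict.get?_insert_self]
        exact ⟨by simp, by simp [PySem.List.max?]⟩
      · rw [hl] at h
        obtain ⟨hne, hmax⟩ := h
        rcases l with _ | ⟨x, t⟩
        · exact absurd rfl hne
        simp only [hl, beq_self_eq_true, if_pos]
        rw [PySem.Dict.get?_insert_self]
        refine ⟨by simp, ?_⟩
        rw [List.cons_append, PySem.List.max?_id_cons] at ⊢
        rw [PySem.List.max?_id_cons] at hmax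
        rw [← hmax]
        simp [List.foldl_append]
    · unfold pvGood at h ⊢
      have hbeq : (kl == key_mov) = false := by simp [hk]
      rcases hl : dl.get? kl with _ | l <;>
        · simp only [hl]
          rw [PySem.Dict.get?_insert_of_ne dl _ (Ne.symm hk), hbeq]
          rcases hm : dl.get? key_mov with _ | lm <;> rw [hm] at h <;> simpa using h

-- keys of the dict are exactly a sublist selection of the input's key strings
theorem pvPre_keys (dict_out : List (String × Int))
    (hpre : ∀ p ∈ dict_out, (pvParseKey p.1).isSome = true) :
    ∀ k ∈ (PySem.Dict.ofList dict_out).keys, (pvParseKey k).isSome = true := by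
  intro k hk
  rw [PySem.Dict.ofList, PySem.Dict.update, PySem.Dict.keys_foldl_insert_key,
    PySem.Set.mem_update] at hk
  rcases hk with h | h
  · simp [PySem.Dict.keys_empty] at h
  · obtain ⟨p, hp, hpk⟩ := List.mem_map.mp h
    exact hpk ▸ hpre p hp

-- ===== VERDICT (by name: the statement is the Claim_ definition above) =====
theorem assing_key_spec : Claim_equal_assing_key := by
  intro dict_out key_mov value _ hpre
  unfold Spec_assing_key assing_key assing_key_alt pvBuildLenA pvBestB
  obtain ⟨dl', best', hA, hB, hgood⟩ :=
    pvLoop key_mov (PySem.Dict.ofList dict_out).keys (pvPre_keys dict_out hpre)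
      PySem.Dict.empty none (by unfold pvGood; rw [PySem.Dict.get?_empty])
  rw [hA, hB]
  unfold pvGood at hgood
  rcases hl : dl'.get? key_mov with _ | l
  · rw [hl] at hgood
    simp only [hl, hgood, String.append_assoc]
    rfl
  · rw [hl] at hgood
    obtain ⟨hne, hmax⟩ := hgood
    rcases l with _ | ⟨x, t⟩
    · exact absurd rfl hne
    rw [PySem.List.max?_id_cons] at hmax
    simp only [hl, PySem.List.max?_id_cons, ← hmax]
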